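-- pv_equiv track=rewrite | github.com/Dimm-ddr/loudlyproud | .tools/tags/registry.py | compare_tag_sets
-- ===== SOURCE A (Python) =====
-- def normalize_tag(tag: str, normalization_rules: dict) -> str:
--     """
--     Normalize a tag using the provided normalization rules.
--
--     Args:
--         tag: The tag to normalize
--         normalization_rules: Dictionary containing normalization patterns
--
--     Returns:
--         The normalized tag
--     """
--     # Convert to lowercase for consistent comparison
--     tag_lower = tag.lower().strip()
--
--     # Check direct normalizations
--     if "normalizations" in normalization_rules:
--         if tag_lower in normalization_rules["normalizations"]:
--             return normalization_rules["normalizations"][tag_lower]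
--
--     # Check URL normalizations
--     if "url_normalizations" in normalization_rules:
--         if tag in normalization_rules["url_normalizations"]:
--             return normalization_rules["url_normalizations"][tag]
--
--     # Default normalization: lowercase and replace spaces/special chars with hyphens
--     normalized = tag_lower.replace(" ", "-")
--     # Remove any non-alphanumeric characters (except hyphens)
--     normalized = "".join(c for c in normalized if c.isalnum() or c == "-")
--     # Remove multiple consecutive hyphens and trailing/leading hyphens
--     while "--" in normalized:
--         normalized = normalized.replace("--", "-")
--     return normalized.strip("-")
--
-- def compare_tag_sets(
--     mapping_tags: set[str], colors_tags: set[str], normalization_rules: dict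
-- ) -> tuple[set[str], set[str]]:
--     """
--     Compare two sets of tags after normalization.
--
--     Args:
--         mapping_tags: Set of tags from mapping.json
--         colors_tags: Set of tags from colors.toml
--         normalization_rules: Dictionary containing normalization patterns
--
--     Returns:
--         Tuple of (tags missing in colors, tags missing in mapping)
--     """
--     # Normalize all tags for comparison
--     normalized_mapping = {
--         normalize_tag(tag, normalization_rules) for tag in mapping_tags
--     }
--     normalized_colors = {normalize_tag(tag, normalization_rules) for tag in colors_tags}
--
--     # Find differences
--     missing_in_colors = {
--         tag
--         for tag in mapping_tags
--         if normalize_tag(tag, normalization_rules) not in normalized_colors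
--     }
--     missing_in_mapping = {
--         tag
--         for tag in colors_tags
--         if normalize_tag(tag, normalization_rules) not in normalized_mapping
--     }
--
--     return missing_in_colors, missing_in_mapping
-- ===== SOURCE B (Python) =====
-- def normalize_tag(tag: str, normalization_rules: dict) -> str:
--     tag_lower = tag.lower().strip()
--     if "normalizations" in normalization_rules:
--         if tag_lower in normalization_rules["normalizations"]:
--             return normalization_rules["normalizations"][tag_lower]
--     if "url_normalizations" in normalization_rules:
--         if tag in normalization_rules["url_normalizations"]:
--             return normalization_rules["url_normalizations"][tag]
--     normalized = tag_lower.replace(" ", "-")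
--     normalized = "".join(c for c in normalized if c.isalnum() or c == "-")
--     while "--" in normalized:
--         normalized = normalized.replace("--", "-")
--     return normalized.strip("-")
--
--
-- def merge_excl(a, b):
--     """Two-pointer merge over two strictly increasing sorted lists:
--     the elements of a that do not occur in b."""
--     out = []
--     i, j = 0, 0
--     while i < len(a) and j < len(b):
--         if a[i] < b[j]:
--             out.append(a[i])
--             i += 1
--         elif b[j] < a[i]:
--             j += 1
--         else:
--             i += 1
--             j += 1
--     out.extend(a[i:])
--     return out
--
--
-- def compare_tag_sets(mapping_tags, colors_tags, normalization_rules):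
--     # Sort the distinct normalized forms of each side, then find the forms
--     # exclusive to each side by a two-pointer merge (instead of hash-set
--     # membership against the other side's whole normalized set).
--     map_sorted = sorted({normalize_tag(t, normalization_rules) for t in mapping_tags})
--     col_sorted = sorted({normalize_tag(t, normalization_rules) for t in colors_tags})
--     only_map = merge_excl(map_sorted, col_sorted)
--     only_col = merge_excl(col_sorted, map_sorted)
--     missing_in_colors = {
--         t for t in mapping_tags if normalize_tag(t, normalization_rules) in only_map
--     }
--     missing_in_mapping = {
--         t for t in colors_tags if normalize_tag(t, normalization_rules) in only_col
--     }
--     return missing_in_colors, missing_in_mapping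
-- ===== Notes on version B (the rewrite author's own statement) =====
-- stated objective: alternative
-- what changed: B sorts the distinct normalized forms of each side and finds the forms exclusive to each side with a two-pointer merge over the two sorted lists, then selects the original tags whose normalized form occurs in that exclusive list, instead of A's hash-set comprehensions that test each tag's normalized form for non-membership in the other side's whole normalized set.
import Mathlib
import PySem

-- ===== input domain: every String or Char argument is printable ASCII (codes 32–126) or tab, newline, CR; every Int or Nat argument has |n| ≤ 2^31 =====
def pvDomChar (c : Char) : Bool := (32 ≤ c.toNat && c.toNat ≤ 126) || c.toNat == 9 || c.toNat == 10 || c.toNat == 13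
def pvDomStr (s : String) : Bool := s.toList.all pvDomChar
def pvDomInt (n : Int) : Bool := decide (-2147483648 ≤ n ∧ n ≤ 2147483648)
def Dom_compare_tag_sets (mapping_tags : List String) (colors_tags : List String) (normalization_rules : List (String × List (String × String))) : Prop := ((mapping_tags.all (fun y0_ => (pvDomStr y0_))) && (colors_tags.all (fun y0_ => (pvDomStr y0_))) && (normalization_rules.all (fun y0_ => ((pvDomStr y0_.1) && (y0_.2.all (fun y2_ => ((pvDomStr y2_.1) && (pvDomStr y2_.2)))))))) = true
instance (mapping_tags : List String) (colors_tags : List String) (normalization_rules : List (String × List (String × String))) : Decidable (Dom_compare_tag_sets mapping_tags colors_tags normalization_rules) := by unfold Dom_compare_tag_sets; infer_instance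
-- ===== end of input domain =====

-- B sorts each side's distinct normalized forms and computes the side-exclusive forms by a
-- two-pointer merge of the two sorted lists, then selects originals from the exclusive list
-- (alternative: sort+merge difference instead of A's hash-set membership comprehensions).


-- ===== PORT A =====
-- shared helper of the module: the 'while "--" in normalized' loop, with fuel
-- (each iteration strictly shortens the string, so len+1 fuel is always enough)
def pvCollapseHyphens (fuel : Nat) (s : String) : String :=
  match fuel with
  | 0 => s
  | f + 1 =>
      if PySem.Str.isIn "--" s then pvCollapseHyphens f (PySem.Str.replace s "--" "-")
      else s

def normalize_tag (tag : String) (normalization_rules : List (String × List (String × String))) : String :=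
  let tag_lower := PySem.Str.strip (PySem.Str.lower tag)
  match List.lookup "normalizations" normalization_rules with
  | some norms =>
      match List.lookup tag_lower norms with
      | some v => v
      | none => normalize_tag_rest tag tag_lower normalization_rules
  | none => normalize_tag_rest tag tag_lower normalization_rules
where
  normalize_tag_rest (tag tag_lower : String) (normalization_rules : List (String × List (String × String))) : String :=
    match List.lookup "url_normalizations" normalization_rules with
    | some urls =>
        match List.lookup tag urls with
        | some v => v
        | none => normalize_tag_default tag_lower
    | none => normalize_tag_default tag_lower
  normalize_tag_default (tag_lower : String) : String :=
    let normalized := PySem.Str.replace tag_lower " " "-"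
    let normalized := String.ofList (normalized.toList.filter (fun c => PySem.Chars.isalnum c || c == '-'))
    let normalized := pvCollapseHyphens (normalized.toList.length + 1) normalized
    PySem.Str.stripChars normalized "-"

def compare_tag_sets (mapping_tags : List String) (colors_tags : List String) (normalization_rules : List (String × List (String × String))) : List String × List String :=
  let normalized_mapping : PySem.Set String :=
    PySem.Set.ofList (mapping_tags.map (fun tag => normalize_tag tag normalization_rules))
  let normalized_colors : PySem.Set String :=
    PySem.Set.ofList (colors_tags.map (fun tag => normalize_tag tag normalization_rules))
  let missing_in_colors : PySem.Set String :=
    PySem.Set.ofList (mapping_tags.filter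
      (fun tag => !(PySem.Set.contains normalized_colors (normalize_tag tag normalization_rules))))
  let missing_in_mapping : PySem.Set String :=
    PySem.Set.ofList (colors_tags.filter
      (fun tag => !(PySem.Set.contains normalized_mapping (normalize_tag tag normalization_rules))))
  (missing_in_colors, missing_in_mapping)

-- ===== PORT B =====
-- Source B's merge_excl: two-pointer merge over two sorted lists, keeping the elements of
-- the first that do not occur in the second (the index pair becomes list consumption)
def pvMergeExcl : List String → List String → List String
  | [], _ => []
  | x :: xs, [] => x :: xs
  | x :: xs, y :: ys =>
      if x < y then x :: pvMergeExcl xs (y :: ys)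
      else if y < x then pvMergeExcl (x :: xs) ys
      else pvMergeExcl xs ys
termination_by as bs => as.length + bs.length

def compare_tag_sets_alt (mapping_tags : List String) (colors_tags : List String) (normalization_rules : List (String × List (String × String))) : List String × List String :=
  let map_sorted := PySem.List.sorted
    (PySem.Set.ofList (mapping_tags.map (fun t => normalize_tag t normalization_rules))) (fun x => x) false
  let col_sorted := PySem.List.sorted
    (PySem.Set.ofList (colors_tags.map (fun t => normalize_tag t normalization_rules))) (fun x => x) false
  let only_map := pvMergeExcl map_sorted col_sorted
  let only_col := pvMergeExcl col_sorted map_sorted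
  let missing_in_colors : PySem.Set String :=
    PySem.Set.ofList (mapping_tags.filter
      (fun t => only_map.contains (normalize_tag t normalization_rules)))
  let missing_in_mapping : PySem.Set String :=
    PySem.Set.ofList (colors_tags.filter
      (fun t => only_col.contains (normalize_tag t normalization_rules)))
  (missing_in_colors, missing_in_mapping)

-- ===== PRECONDITION & SPEC =====
def Spec_compare_tag_sets (mapping_tags : List String) (colors_tags : List String) (normalization_rules : List (String × List (String × String))) (out : List String × List String) : Prop := out = compare_tag_sets_alt mapping_tags colors_tags normalization_rules
instance (mapping_tags : List String) (colors_tags : List String) (normalization_rules : List (String × List (String × String))) (out : List String × List String) : Decidable (Spec_compare_tag_sets mapping_tags colors_tags normalization_rules out) := by unfold Spec_compare_tag_sets; infer_instance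

-- ===== CLAIM =====
def Claim_equal_compare_tag_sets : Prop := ∀ (mapping_tags : List String) (colors_tags : List String) (normalization_rules : List (String × List (String × String))), Dom_compare_tag_sets mapping_tags colors_tags normalization_rules → Spec_compare_tag_sets mapping_tags colors_tags normalization_rules (compare_tag_sets mapping_tags colors_tags normalization_rules)

-- ===== LEMMAS AND PROOFS =====

-- merge difference of two strictly increasing lists = "in the first, not in the second"
theorem mem_pvMergeExcl (x : String) : ∀ (as bs : List String),
    as.Pairwise (· < ·) → bs.Pairwise (· < ·) →
    (x ∈ pvMergeExcl as bs ↔ x ∈ as ∧ x ∉ bs) := by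
  intro as bs
  fun_induction pvMergeExcl as bs with
  | case1 bs => simp
  | case2 a as => simp
  | case3 a as b bs hab ih =>
      intro ha hb
      have hnotin : ∀ z : String, z = a → z ∉ b :: bs := by
        rintro z rfl hc
        rcases List.mem_cons.mp hc with rfl | hc
        · exact lt_irrefl z hab
        · exact lt_irrefl z (lt_trans hab (List.rel_of_pairwise_cons hb hc))
      rw [pvMergeExcl.eq_def, ← pvMergeExcl.eq_def]
      constructor
      · intro hx
        rcases List.mem_cons.mp hx with rfl | hx
        · exact ⟨List.mem_cons_self, hnotin _ rfl⟩
        · obtain ⟨h1, h2⟩ := (ih (List.Pairwise.of_cons ha) hb).mp hx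
          exact ⟨List.mem_cons_of_mem _ h1, h2⟩
      · rintro ⟨h1, h2⟩
        rcases List.mem_cons.mp h1 with rfl | h1
        · exact List.mem_cons_self
        · exact List.mem_cons_of_mem _ ((ih (List.Pairwise.of_cons ha) hb).mpr ⟨h1, h2⟩)
  | case4 a as b bs hab hba ih =>
      intro ha hb
      have hne : ∀ z ∈ a :: as, z ≠ b := by
        rintro z hz rfl
        rcases List.mem_cons.mp hz with rfl | hz
        · exact lt_irrefl _ hba
        · exact lt_irrefl _ (lt_trans hba (List.rel_of_pairwise_cons ha hz))
      rw [pvMergeExcl.eq_def, ← pvMergeExcl.eq_def]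
      rw [ih ha (List.Pairwise.of_cons hb)]
      constructor
      · rintro ⟨h1, h2⟩
        refine ⟨h1, fun hc => ?_⟩
        rcases List.mem_cons.mp hc with rfl | hc
        · exact hne _ h1 rfl
        · exact h2 hc
      · rintro ⟨h1, h2⟩
        exact ⟨h1, fun hc => h2 (List.mem_cons_of_mem _ hc)⟩
  | case5 a as b bs hab hba ih =>
      intro ha hb
      have heq : a = b := le_antisymm (not_lt.mp hba) (not_lt.mp hab)
      subst heq
      rw [pvMergeExcl.eq_def, ← pvMergeExcl.eq_def]
      rw [ih (List.Pairwise.of_cons ha) (List.Pairwise.of_cons hb)]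
      constructor
      · rintro ⟨h1, h2⟩
        refine ⟨List.mem_cons_of_mem _ h1, fun hc => ?_⟩
        rcases List.mem_cons.mp hc with rfl | hc
        · exact lt_irrefl x (List.rel_of_pairwise_cons ha h1)
        · exact h2 hc
      · rintro ⟨h1, h2⟩
        rcases List.mem_cons.mp h1 with rfl | h1
        · exact absurd List.mem_cons_self h2
        · exact ⟨h1, fun hc => h2 (List.mem_cons_of_mem _ hc)⟩

-- the B-side per-tag selection predicate equals A's, for tags of the first list
theorem pv_pred_eq (f : String → String) (xs ys : List String) (t : String) (ht : t ∈ xs) :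
    (pvMergeExcl (PySem.List.sorted (PySem.Set.ofList (xs.map f)) (fun x => x) false)
                 (PySem.List.sorted (PySem.Set.ofList (ys.map f)) (fun x => x) false)).contains (f t)
    = !(PySem.Set.contains (PySem.Set.ofList (ys.map f)) (f t)) := by
  have hm := mem_pvMergeExcl (f t)
    (PySem.List.sorted (PySem.Set.ofList (xs.map f)) (fun x => x) false)
    (PySem.List.sorted (PySem.Set.ofList (ys.map f)) (fun x => x) false)
    (PySem.List.sorted_ofList_pairwise_lt _)
    (PySem.List.sorted_ofList_pairwise_lt _)
  have hin : f t ∈ PySem.Set.ofList (xs.map f) :=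
    (PySem.Set.mem_ofList _ _).mpr (List.mem_map.mpr ⟨t, ht, rfl⟩)
  have hgoal : (f t ∈ pvMergeExcl
      (PySem.List.sorted (PySem.Set.ofList (xs.map f)) (fun x => x) false)
      (PySem.List.sorted (PySem.Set.ofList (ys.map f)) (fun x => x) false))
      ↔ f t ∉ PySem.Set.ofList (ys.map f) := by
    rw [hm, PySem.List.mem_sorted, PySem.List.mem_sorted]
    exact ⟨fun ⟨_, h⟩ => h, fun h => ⟨hin, h⟩⟩
  rw [Bool.eq_iff_iff, List.contains_iff_mem, hgoal]
  simp

-- ===== VERDICT =====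
theorem compare_tag_sets_spec : Claim_equal_compare_tag_sets := by
  intro m c rules _hdom
  unfold Spec_compare_tag_sets compare_tag_sets compare_tag_sets_alt
  refine Prod.ext ?_ ?_ <;> simp only []
  · exact congrArg PySem.Set.ofList
      (List.filter_congr (fun t ht =>
        (pv_pred_eq (fun t => normalize_tag t rules) m c t ht).symm))
  · exact congrArg PySem.Set.ofList
      (List.filter_congr (fun t ht =>
        (pv_pred_eq (fun t => normalize_tag t rules) c m t ht).symm))
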